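-- pv_equiv track=rewrite | github.com/sunabcun/BioinfoStudy | Session1/Week1/patnum.py | NumberToPattern
-- ===== SOURCE A (Python) =====
-- def NumberToPattern(num, k):
--     Nuc = {0:'A', 1:'C', 2: 'G', 3: 'T'}
--     ptn = []
--    # print ("num: ", num)
--     for i in range(k):
--         if num > 0:
--             remainder = num%4
--             #print ("remainder: ", remainder)
--             num = int(num/4)
--             #print ("num after: ", num)
--             ptn.append(Nuc[remainder])
--         elif num == 0:
--             ptn.append(Nuc[0])
--
--     ptn.reverse()
--     return ptn
-- ===== SOURCE B (Python) =====
-- def NumberToPattern(num, k):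
--     NUC = 'ACGT'
--     return [NUC[(num >> (2 * i)) & 3] for i in range(k - 1, -1, -1)]
-- ===== Notes on version B (the rewrite author's own statement) =====
-- stated objective: simpler
-- what changed: A mutates num through a k-step divide loop, appends digits least-significant first and reverses at the end; B reads each base-4 digit directly at its position with a shift-and-mask comprehension over range(k-1,-1,-1), no state and no reverse. Pre_ restricts to num >= 0, the function's natural domain: on negative num A's loop body is skipped every iteration and it returns [] as an artefact.
-- outside the precondition, e.g. on NumberToPattern(-5, 2): A returns [], B returns ['G', 'T']
import Mathlib
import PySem

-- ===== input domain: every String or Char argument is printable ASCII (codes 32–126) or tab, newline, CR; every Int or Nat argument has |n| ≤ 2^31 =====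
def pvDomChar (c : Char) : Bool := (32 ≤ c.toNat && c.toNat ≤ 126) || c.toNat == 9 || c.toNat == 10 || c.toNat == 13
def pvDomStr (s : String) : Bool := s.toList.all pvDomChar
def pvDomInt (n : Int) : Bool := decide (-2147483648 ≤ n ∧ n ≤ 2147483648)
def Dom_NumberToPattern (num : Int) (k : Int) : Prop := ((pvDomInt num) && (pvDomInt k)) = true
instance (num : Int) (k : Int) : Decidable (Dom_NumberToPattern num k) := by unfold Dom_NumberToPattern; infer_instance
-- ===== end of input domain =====

-- B replaces A's digit-by-digit state loop plus final reverse by a direct positional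
-- comprehension (most-significant digit first, each digit read off by shift-and-mask);
-- objective: simpler/idiomatic, same O(k) cost.

-- ===== PORT A =====
-- Nuc = {0:'A', 1:'C', 2:'G', 3:'T'}
def npNuc : PySem.Dict Int String := PySem.Dict.ofList [(0, "A"), (1, "C"), (2, "G"), (3, "T")]

-- the 'for i in range(k)' loop, state = (num, ptn); dict lookup Nuc[r] is total here
-- (r = num % 4 ∈ {0,1,2,3} resp. r = 0), so '.getD ""' is never taken.
def npLoop : Nat → Int → List String → Int × List String
  | 0, num, ptn => (num, ptn)
  | n + 1, num, ptn =>
    if num > 0 then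
      -- num = int(num/4): float-free exact port via PySem.Int.truncdiv (|num| ≤ 2^31 < 2^53 on Dom)
      npLoop n (PySem.Int.truncdiv num 4)
        (ptn ++ [(npNuc.get? (PySem.Int.mod num 4)).getD ""])
    else if num = 0 then
      npLoop n num (ptn ++ [(npNuc.get? 0).getD ""])
    else
      npLoop n num ptn

def NumberToPattern (num : Int) (k : Int) : List String :=
  ((npLoop k.toNat num []).2).reverse

-- ===== PORT B =====
-- [NUC[(num >> (2*i)) & 3] for i in range(k-1, -1, -1)]; NUC = 'ACGT', a Python str,
-- so NUC[j] is the one-character string at index j (j = … & 3 ∈ {0,1,2,3}, in range;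
-- i ≥ 0 throughout the range, so the shift amount (2*i).toNat is exact)
def NumberToPattern_alt (num : Int) (k : Int) : List String :=
  (PySem.List.pyRange (k - 1) (-1) (-1)).map
    (fun i => PySem.List.pyGetD ["A", "C", "G", "T"]
      (PySem.Int.band (num >>> (2 * i).toNat) 3) "")

-- ===== PRECONDITION & SPEC =====
-- Pre_ restricts to num ≥ 0, the natural domain of a base-4 pattern index: on negative
-- num A returns [] only because both loop branches are skipped — an implementation artefact.
def Pre_NumberToPattern (num : Int) (k : Int) : Prop := 0 ≤ num
instance (num : Int) (k : Int) : Decidable (Pre_NumberToPattern num k) := by unfold Pre_NumberToPattern; infer_instance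
def pvWitness_NumberToPattern : Int × Int := (11, 3)

def Spec_NumberToPattern (num : Int) (k : Int) (out : List String) : Prop := out = NumberToPattern_alt num k
instance (num : Int) (k : Int) (out : List String) : Decidable (Spec_NumberToPattern num k out) := by unfold Spec_NumberToPattern; infer_instance

-- ===== CLAIM (what is proved, stated in full; the proofs are below) =====
def Claim_equal_NumberToPattern : Prop := ∀ (num : Int) (k : Int), Dom_NumberToPattern num k → Pre_NumberToPattern num k → Spec_NumberToPattern num k (NumberToPattern num k)

-- ===== LEMMAS AND PROOFS =====

-- the letter appended for a remainder r
def npL (r : Int) : String := (npNuc.get? r).getD ""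

theorem npLoop_nonneg (n : Nat) (num : Int) (acc : List String) (h : 0 ≤ num) :
    (npLoop n num acc).2 =
      acc ++ (List.range n).map (fun j => npL (num / 4 ^ j % 4)) := by
  induction n generalizing num acc with
  | zero => simp [npLoop]
  | succ n ih =>
    have hstep : (npLoop (n + 1) num acc).2 = (npLoop n (num / 4) (acc ++ [npL (num % 4)])).2 := by
      rcases lt_or_eq_of_le h with hpos | hzero
      · simp only [npLoop, if_pos hpos, npL]
        rw [PySem.Int.mod_eq_emod_of_pos (by norm_num : (0:Int) < 4)]
        congr 2
        simp only [PySem.Int.truncdiv]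
        exact Int.tdiv_eq_ediv_of_nonneg h
      · rw [← hzero]
        norm_num [npLoop, npL]
    rw [hstep, ih _ _ (by positivity)]
    rw [List.range_succ_eq_map, List.map_cons, List.map_map]
    have hfun : (fun j => npL (num / 4 / 4 ^ j % 4)) =
        ((fun j => npL (num / 4 ^ j % 4)) ∘ Nat.succ) := by
      funext j
      simp only [Function.comp, Nat.succ_eq_add_one, pow_succ]
      rw [Int.ediv_ediv_of_nonneg (by norm_num), mul_comm]
    rw [hfun]
    simp

-- the value B reads off at position j is the j-th base-4 digit of num (num ≥ 0)
theorem npDigit_eq (num : Int) (h : 0 ≤ num) (j : Nat) :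
    PySem.Int.band (num >>> (((2 * ((j : Nat) : Int)).toNat : Nat) : Int)) 3 = num / 4 ^ j % 4 := by
  obtain ⟨m, rfl⟩ := Int.eq_ofNat_of_zero_le h
  have ht : (2 * ((j : Nat) : Int)).toNat = 2 * j := by omega
  rw [ht]
  rw [Int.shiftRight_natCast m (2 * j),
    show ((3 : Int)) = ((3 : Nat) : Int) by norm_num, PySem.Int.band_natCast]
  have h2 : (m >>> (2 * j)) &&& 3 = m / 4 ^ j % 4 := by
    rw [Nat.shiftRight_eq_div_pow,
      show (3 : Nat) = 2 ^ 2 - 1 by norm_num, Nat.and_two_pow_sub_one_eq_mod,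
      show (2 : Nat) ^ (2 * j) = 4 ^ j by rw [pow_mul]; norm_num,
      show (2 : Nat) ^ 2 = 4 by norm_num]
  rw [h2]
  push_cast [Int.natCast_ediv, Int.natCast_emod]
  rfl

theorem npL_letter (r : Nat) (hr : r < 4) :
    PySem.List.pyGetD ["A", "C", "G", "T"] ((r : Nat) : Int) "" = npL ((r : Nat) : Int) := by
  interval_cases r <;> decide

-- ===== VERDICT (by name: the statement is the Claim_ definition above) =====
theorem NumberToPattern_spec : Claim_equal_NumberToPattern := by
  intro num k _ hpre
  unfold Spec_NumberToPattern NumberToPattern NumberToPattern_alt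
  have hneg : (0:Int) ≤ num := hpre
  rw [npLoop_nonneg _ _ _ hneg]
  have hrange : PySem.List.pyRange (k - 1) (-1) (-1) =
      List.map (fun j : Nat => k - 1 + -1 * (Nat.cast j : Int)) (List.range k.toNat) := by
    rw [PySem.List.pyRange]
    norm_num
    split_ifs with h
    · congr 1
    · have h0 : k.toNat = 0 := by omega
      simp [h0]
  rw [hrange, List.nil_append, List.map_map]
  apply List.ext_getElem
  · simp
  · intro j h1 h2
    simp only [List.length_reverse, List.length_map, List.length_range] at h1
    simp only [List.getElem_reverse, List.getElem_map, List.getElem_range, Function.comp,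
      List.length_map, List.length_range]
    have hi : k - 1 + -1 * ((j : Nat) : Int) = ((k.toNat - 1 - j : Nat) : Int) := by omega
    rw [hi, npDigit_eq num hneg (k.toNat - 1 - j)]
    have hb0 : (0:Int) ≤ num / 4 ^ (k.toNat - 1 - j) % 4 := Int.emod_nonneg _ (by norm_num)
    have hb1 : num / 4 ^ (k.toNat - 1 - j) % 4 < 4 := Int.emod_lt_of_pos _ (by norm_num)
    rw [show num / 4 ^ (k.toNat - 1 - j) % 4
          = (((num / 4 ^ (k.toNat - 1 - j) % 4).toNat : Nat) : Int) by omega]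
    exact (npL_letter _ (by omega)).symm
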